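-- pv_equiv track=rewrite | github.com/devang-k/k8s | metrics_calculation/calculate_metrics.py | assign_polygons_to_subcells
-- ===== SOURCE A (Python) =====
-- def clip_polygon(inner, outer):
--     ix1, iy1, ix2, iy2 = inner
--     ox1, oy1, ox2, oy2 = outer
--     nx1 = max(ix1, ox1)
--     ny1 = max(iy1, oy1)
--     nx2 = min(ix2, ox2)
--     ny2 = min(iy2, oy2)
--     if nx1 < nx2 and ny1 < ny2:
--         return (nx1, ny1, nx2, ny2)
--     else:
--         return None
--
-- def assign_polygons_to_subcells(boundaries, small_rectangles):
--     boundary_dict = {boundary: [] for boundary in boundaries}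
--     for small_rect in small_rectangles:
--         for boundary in boundaries:
--             clipped = clip_polygon(small_rect, boundary)
--             if clipped:
--                 boundary_dict[boundary].append(clipped)
--     return boundary_dict
-- ===== SOURCE B (Python) =====
-- def assign_polygons_to_subcells(boundaries, small_rectangles):
--     # Sort boundaries by left edge once; each rectangle then only visits the
--     # sorted prefix of boundaries whose left edge lies left of its right edge
--     # and stops early, instead of testing every (rectangle, boundary) pair.
--     sorted_boundaries = sorted(boundaries, key=lambda b: b[0])
--     result = {b: [] for b in boundaries}
--     for rx1, ry1, rx2, ry2 in small_rectangles:
--         for b in sorted_boundaries: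
--             bx1, by1, bx2, by2 = b
--             if bx1 >= rx2:
--                 break  # sorted by bx1: no later boundary overlaps this rectangle
--             x1 = rx1 if rx1 > bx1 else bx1
--             y1 = ry1 if ry1 > by1 else by1
--             x2 = rx2 if rx2 < bx2 else bx2
--             y2 = ry2 if ry2 < by2 else by2
--             if x1 < x2 and y1 < y2:
--                 result[b].append((x1, y1, x2, y2))
--     return result
-- ===== Notes on version B (the rewrite author's own statement) =====
-- stated objective: faster
-- what changed: B sorts the boundaries once by left edge and, for each rectangle, scans only the sorted prefix of boundaries whose left edge lies left of the rectangle's right edge (breaking out at the first boundary past it), instead of A's full pairwise scan; correct because a boundary starting right of the rectangle's right edge can never produce a clip, and per-boundary output order depends only on rectangle order.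
import Mathlib
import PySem

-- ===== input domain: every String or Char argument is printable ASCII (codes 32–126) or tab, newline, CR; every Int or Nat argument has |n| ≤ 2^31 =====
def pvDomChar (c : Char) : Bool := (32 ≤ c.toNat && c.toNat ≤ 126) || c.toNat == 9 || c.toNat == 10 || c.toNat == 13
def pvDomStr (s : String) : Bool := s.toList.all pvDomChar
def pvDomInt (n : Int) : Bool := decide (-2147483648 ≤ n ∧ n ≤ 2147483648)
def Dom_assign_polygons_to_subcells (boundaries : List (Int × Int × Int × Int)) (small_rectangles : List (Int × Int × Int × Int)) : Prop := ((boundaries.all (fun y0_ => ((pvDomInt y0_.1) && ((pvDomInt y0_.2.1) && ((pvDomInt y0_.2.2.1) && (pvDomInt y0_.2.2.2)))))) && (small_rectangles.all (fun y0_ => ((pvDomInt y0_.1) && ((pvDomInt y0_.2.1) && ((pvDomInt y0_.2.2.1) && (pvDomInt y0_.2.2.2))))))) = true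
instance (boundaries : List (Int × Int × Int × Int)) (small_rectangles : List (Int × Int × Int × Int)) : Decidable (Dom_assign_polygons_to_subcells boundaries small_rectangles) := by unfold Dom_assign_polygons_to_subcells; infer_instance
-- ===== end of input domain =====

-- B sorts the boundaries by left edge once and, per rectangle, scans only the sorted prefix
-- of boundaries whose left edge lies left of the rectangle's right edge, stopping early,
-- instead of A's full N×M pairwise scan (objective: faster; a timing run measured B faster).

-- ===== PORT A =====
def pvClipPolygon (inner : Int × Int × Int × Int) (outer : Int × Int × Int × Int) :
    Option (Int × Int × Int × Int) :=
  -- Python max(a, b) / min(a, b) on ints, ported as their defining conditionals (exact)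
  let nx1 := if inner.1 < outer.1 then outer.1 else inner.1
  let ny1 := if inner.2.1 < outer.2.1 then outer.2.1 else inner.2.1
  let nx2 := if outer.2.2.1 < inner.2.2.1 then outer.2.2.1 else inner.2.2.1
  let ny2 := if outer.2.2.2 < inner.2.2.2 then outer.2.2.2 else inner.2.2.2
  if nx1 < nx2 ∧ ny1 < ny2 then some (nx1, ny1, nx2, ny2) else none

-- dict entry (key, value) flattened into the quintuple return type (type-convention glue, used by both ports)
def pvFlat (p : (Int × Int × Int × Int) × List (Int × Int × Int × Int)) :
    Int × Int × Int × Int × List (Int × Int × Int × Int) :=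
  (p.1.1, p.1.2.1, p.1.2.2.1, p.1.2.2.2, p.2)

-- body of A's inner loop: 'clipped = clip_polygon(...); if clipped: boundary_dict[boundary].append(clipped)'
def pvStepA (small_rect : Int × Int × Int × Int)
    (d : PySem.Dict (Int × Int × Int × Int) (List (Int × Int × Int × Int)))
    (boundary : Int × Int × Int × Int) :
    PySem.Dict (Int × Int × Int × Int) (List (Int × Int × Int × Int)) :=
  match pvClipPolygon small_rect boundary with
  | some clipped => d.modify boundary [] (· ++ [clipped])
  | none => d

def assign_polygons_to_subcells (boundaries : List (Int × Int × Int × Int)) (small_rectangles : List (Int × Int × Int × Int)) : List (Int × Int × Int × Int × List (Int × Int × Int × Int)) :=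
  let d0 := boundaries.foldl (fun d b => d.insert b []) PySem.Dict.empty
  let d := small_rectangles.foldl (fun d r => boundaries.foldl (pvStepA r) d) d0
  d.items.map pvFlat

-- ===== PORT B =====
-- body of B's inner loop: inline clip (x1 = rx1 if rx1 > bx1 else bx1, …) and append
def pvStepB (r : Int × Int × Int × Int)
    (d : PySem.Dict (Int × Int × Int × Int) (List (Int × Int × Int × Int)))
    (b : Int × Int × Int × Int) :
    PySem.Dict (Int × Int × Int × Int) (List (Int × Int × Int × Int)) :=
  let x1 := if r.1 > b.1 then r.1 else b.1
  let y1 := if r.2.1 > b.2.1 then r.2.1 else b.2.1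
  let x2 := if r.2.2.1 < b.2.2.1 then r.2.2.1 else b.2.2.1
  let y2 := if r.2.2.2 < b.2.2.2 then r.2.2.2 else b.2.2.2
  if x1 < x2 ∧ y1 < y2 then d.modify b [] (· ++ [(x1, y1, x2, y2)]) else d

def assign_polygons_to_subcells_alt (boundaries : List (Int × Int × Int × Int)) (small_rectangles : List (Int × Int × Int × Int)) : List (Int × Int × Int × Int × List (Int × Int × Int × Int)) :=
  let sb := PySem.List.sorted boundaries (fun b => b.1) false
  let d0 := boundaries.foldl (fun d b => d.insert b []) PySem.Dict.empty
  -- the 'for b in sorted_boundaries: if b[0] >= rx2: break; …' loop is exactly a fold over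
  -- the takeWhile(b[0] < rx2) prefix of the sorted list
  let d := small_rectangles.foldl
    (fun d r => (sb.takeWhile (fun b => decide (b.1 < r.2.2.1))).foldl (pvStepB r) d) d0
  d.items.map pvFlat

-- ===== PRECONDITION & SPEC =====
def Spec_assign_polygons_to_subcells (boundaries : List (Int × Int × Int × Int)) (small_rectangles : List (Int × Int × Int × Int)) (out : List (Int × Int × Int × Int × List (Int × Int × Int × Int))) : Prop := out = assign_polygons_to_subcells_alt boundaries small_rectangles
instance (boundaries : List (Int × Int × Int × Int)) (small_rectangles : List (Int × Int × Int × Int)) (out : List (Int × Int × Int × Int × List (Int × Int × Int × Int))) : Decidable (Spec_assign_polygons_to_subcells boundaries small_rectangles out) := by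
  unfold Spec_assign_polygons_to_subcells
  letI d1 : DecidableEq (Int × List (Int × Int × Int × Int)) := inferInstance
  letI d2 : DecidableEq (Int × Int × List (Int × Int × Int × Int)) := inferInstance
  letI d3 : DecidableEq (Int × Int × Int × List (Int × Int × Int × Int)) := inferInstance
  letI d4 : DecidableEq (Int × Int × Int × Int × List (Int × Int × Int × Int)) := inferInstance
  infer_instance

-- ===== CLAIM (what is proved, stated in full; the proofs are below) =====
def Claim_equal_assign_polygons_to_subcells : Prop := ∀ (boundaries : List (Int × Int × Int × Int)) (small_rectangles : List (Int × Int × Int × Int)), Dom_assign_polygons_to_subcells boundaries small_rectangles → Spec_assign_polygons_to_subcells boundaries small_rectangles (assign_polygons_to_subcells boundaries small_rectangles)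

-- ===== LEMMAS AND PROOFS =====

-- B's step is A's step: the inline min/max clip is clip_polygon
theorem pvStepB_eq_stepA (r b : Int × Int × Int × Int)
    (d : PySem.Dict (Int × Int × Int × Int) (List (Int × Int × Int × Int))) :
    pvStepB r d b = pvStepA r d b := by
  unfold pvStepB pvStepA pvClipPolygon
  have hx1 : (if r.1 > b.1 then r.1 else b.1) = (if r.1 < b.1 then b.1 else r.1) := by
    split_ifs <;> omega
  have hy1 : (if r.2.1 > b.2.1 then r.2.1 else b.2.1) = (if r.2.1 < b.2.1 then b.2.1 else r.2.1) := by
    split_ifs <;> omega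
  have hx2 : (if r.2.2.1 < b.2.2.1 then r.2.2.1 else b.2.2.1) = (if b.2.2.1 < r.2.2.1 then b.2.2.1 else r.2.2.1) := by
    split_ifs <;> omega
  have hy2 : (if r.2.2.2 < b.2.2.2 then r.2.2.2 else b.2.2.2) = (if b.2.2.2 < r.2.2.2 then b.2.2.2 else r.2.2.2) := by
    split_ifs <;> omega
  simp only [hx1, hy1, hx2, hy2]
  split_ifs with h <;> simp

-- what one rectangle contributes to key k when the inner loop visits k exactly n times
def pvApp (r k : Int × Int × Int × Int) (n : Nat) : List (Int × Int × Int × Int) :=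
  match pvClipPolygon r k with
  | none => []
  | some c => List.replicate n c

-- the inner loop (one rectangle against a list of boundaries) only modifies keys it visits,
-- appending its clip once per occurrence of the key
theorem pvInner_getD (r : Int × Int × Int × Int) (bs : List (Int × Int × Int × Int))
    (d : PySem.Dict (Int × Int × Int × Int) (List (Int × Int × Int × Int)))
    (k : Int × Int × Int × Int) :
    (bs.foldl (pvStepA r) d).getD k [] = d.getD k [] ++ pvApp r k (bs.count k) := by
  induction bs generalizing d with
  | nil => cases hc : pvClipPolygon r k <;> simp [pvApp, hc]
  | cons b t ih =>
    rw [List.foldl_cons, ih]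
    by_cases hk : k = b
    · subst hk
      unfold pvStepA
      cases hc : pvClipPolygon r k with
      | none => simp [pvApp, hc]
      | some c =>
        rw [PySem.Dict.getD_modify_self]
        simp [pvApp, hc, List.count_cons_self, List.replicate_succ, List.append_assoc]
    · have hstep : (pvStepA r d b).getD k [] = d.getD k [] := by
        unfold pvStepA
        cases pvClipPolygon r b with
        | none => rfl
        | some c => exact PySem.Dict.getD_modify_of_ne d [] _ hk
      rw [hstep, List.count_cons_of_ne (by simpa using (Ne.symm hk))]

-- the inner loop leaves the key list unchanged when every visited key is already present
theorem pvInner_keys (r : Int × Int × Int × Int) (bs : List (Int × Int × Int × Int))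
    (d : PySem.Dict (Int × Int × Int × Int) (List (Int × Int × Int × Int)))
    (h : ∀ x ∈ bs, x ∈ d.keys) :
    (bs.foldl (pvStepA r) d).keys = d.keys := by
  induction bs generalizing d with
  | nil => rfl
  | cons b t ih =>
    have hb : b ∈ d.keys := h b (by simp)
    have hkeys : (pvStepA r d b).keys = d.keys := by
      unfold pvStepA
      cases pvClipPolygon r b with
      | none => rfl
      | some c =>
        rw [PySem.Dict.keys_modify]
        exact PySem.Dict.keys_insert_of_contains _ _ ((PySem.Dict.contains_iff_mem_keys _ _).2 hb)
    rw [List.foldl_cons, ih (pvStepA r d b) (fun x hx => hkeys ▸ h x (by simp [hx])), hkeys]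

-- the whole outer loop, where rectangle r's inner loop runs over the list bsf r
theorem pvOuter_getD (bsf : (Int × Int × Int × Int) → List (Int × Int × Int × Int))
    (s : List (Int × Int × Int × Int))
    (d : PySem.Dict (Int × Int × Int × Int) (List (Int × Int × Int × Int)))
    (k : Int × Int × Int × Int) :
    (s.foldl (fun d r => (bsf r).foldl (pvStepA r) d) d).getD k [] =
      d.getD k [] ++ s.flatMap (fun r => pvApp r k ((bsf r).count k)) := by
  induction s generalizing d with
  | nil => simp
  | cons r t ih =>
    rw [List.foldl_cons, ih, pvInner_getD, List.flatMap_cons, List.append_assoc]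

theorem pvOuter_keys (bsf : (Int × Int × Int × Int) → List (Int × Int × Int × Int))
    (s : List (Int × Int × Int × Int))
    (d : PySem.Dict (Int × Int × Int × Int) (List (Int × Int × Int × Int)))
    (h : ∀ r x, x ∈ bsf r → x ∈ d.keys) :
    (s.foldl (fun d r => (bsf r).foldl (pvStepA r) d) d).keys = d.keys := by
  induction s generalizing d with
  | nil => rfl
  | cons r t ih =>
    have h1 : ((bsf r).foldl (pvStepA r) d).keys = d.keys :=
      pvInner_keys r (bsf r) d (fun x hx => h r x hx)
    rw [List.foldl_cons, ih _ (fun r' x hx => h1 ▸ h r' x hx), h1]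

-- a successful clip forces the boundary's left edge left of the rectangle's right edge
theorem pvClip_some_left (r k : Int × Int × Int × Int) (c : Int × Int × Int × Int)
    (h : pvClipPolygon r k = some c) : k.1 < r.2.2.1 := by
  simp only [pvClipPolygon] at h
  split_ifs at h <;> omega

-- on the sorted list, the takeWhile prefix keeps every occurrence of a key left of rx2
theorem pvCount_takeWhile (boundaries : List (Int × Int × Int × Int)) (rx2 : Int)
    (k : Int × Int × Int × Int) (hk : k.1 < rx2) :
    ((PySem.List.sorted boundaries (fun b => b.1) false).takeWhile
        (fun b => decide (b.1 < rx2))).count k = boundaries.count k := by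
  set sb := PySem.List.sorted boundaries (fun b => b.1) false with hsb
  set p : (Int × Int × Int × Int) → Bool := fun b => decide (b.1 < rx2) with hp
  have hdw : (sb.dropWhile p).count k = 0 := by
    rw [List.count_eq_zero]
    intro hmem
    have hpairdw : (sb.dropWhile p).Pairwise (fun a b => a.1 ≤ b.1) :=
      (PySem.List.sorted_pairwise boundaries _).sublist (List.dropWhile_sublist p)
    cases hdwe : sb.dropWhile p with
    | nil => rw [hdwe] at hmem; simp at hmem
    | cons hd tl =>
      have hhd : ¬ p hd = true := by
        have := List.head?_dropWhile_not p sb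
        rw [hdwe] at this
        simpa using this
      have hhd' : rx2 ≤ hd.1 := by
        simp only [hp, decide_eq_true_eq] at hhd; omega
      rw [hdwe] at hmem hpairdw
      rcases List.mem_cons.1 hmem with hkh | hkt
      · rw [hkh] at hk; omega
      · have : hd.1 ≤ k.1 := (List.pairwise_cons.1 hpairdw).1 k hkt
        omega
  have hperm : (sb.takeWhile p ++ sb.dropWhile p).count k = boundaries.count k := by
    rw [List.takeWhile_append_dropWhile]
    exact (PySem.List.sorted_perm boundaries _ _).count_eq k
  rw [List.count_append, hdw] at hperm
  omega

-- per rectangle and key, B's pruned visit count contributes exactly what A's full scan does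
theorem pvApp_count_eq (boundaries : List (Int × Int × Int × Int)) (r k : Int × Int × Int × Int) :
    pvApp r k (((PySem.List.sorted boundaries (fun b => b.1) false).takeWhile
        (fun b => decide (b.1 < r.2.2.1))).count k) = pvApp r k (boundaries.count k) := by
  unfold pvApp
  cases hc : pvClipPolygon r k with
  | none => rfl
  | some c => rw [pvCount_takeWhile boundaries r.2.2.1 k (pvClip_some_left r k c hc)]

theorem pvFlatMap_congr {α β : Type} (l : List α) (f g : α → List β)
    (h : ∀ x ∈ l, f x = g x) : l.flatMap f = l.flatMap g := by
  induction l with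
  | nil => rfl
  | cons x t ih =>
    rw [List.flatMap_cons, List.flatMap_cons, h x (by simp),
      ih (fun y hy => h y (by simp [hy]))]

-- ===== VERDICT (by name: the statement is the Claim_ definition above) =====
theorem assign_polygons_to_subcells_spec : Claim_equal_assign_polygons_to_subcells := by
  intro boundaries small_rectangles _hdom
  unfold Spec_assign_polygons_to_subcells
  have hstep_eq : pvStepB = pvStepA :=
    funext fun r => funext fun d => funext fun b => pvStepB_eq_stepA r b d
  have hredA : assign_polygons_to_subcells boundaries small_rectangles =
      (small_rectangles.foldl (fun d r => boundaries.foldl (pvStepA r) d)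
        (boundaries.foldl (fun d b => d.insert b []) PySem.Dict.empty)).items.map pvFlat := rfl
  have hredB : assign_polygons_to_subcells_alt boundaries small_rectangles =
      (small_rectangles.foldl
        (fun d r => ((PySem.List.sorted boundaries (fun b => b.1) false).takeWhile
            (fun b => decide (b.1 < r.2.2.1))).foldl (pvStepA r) d)
        (boundaries.foldl (fun d b => d.insert b []) PySem.Dict.empty)).items.map pvFlat := by
    simp only [assign_polygons_to_subcells_alt, hstep_eq]
  rw [hredA, hredB]
  set d0 := boundaries.foldl (fun d b => d.insert b []) PySem.Dict.empty with hd0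
  have hkeys0 : ∀ b ∈ boundaries, b ∈ d0.keys := by
    intro b hb
    rw [hd0, PySem.Dict.keys_foldl_insert, PySem.Dict.keys_empty,
      PySem.Set.update_nil_left, PySem.Set.mem_ofList]
    exact hb
  have hnd0 : d0.keys.Nodup :=
    PySem.Dict.nodup_keys_foldl_insert boundaries _ _ PySem.Dict.nodup_keys_empty
  set bsfA : (Int × Int × Int × Int) → List (Int × Int × Int × Int) := fun _ => boundaries with hbsfA
  set bsfB : (Int × Int × Int × Int) → List (Int × Int × Int × Int) :=
    fun r => (PySem.List.sorted boundaries (fun b => b.1) false).takeWhile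
      (fun b => decide (b.1 < r.2.2.1)) with hbsfB
  have hmemA : ∀ r x, x ∈ bsfA r → x ∈ d0.keys := fun r x hx => hkeys0 x hx
  have hmemB : ∀ r x, x ∈ bsfB r → x ∈ d0.keys := by
    intro r x hx
    exact hkeys0 x ((PySem.List.mem_sorted boundaries _ _ x).1 ((List.takeWhile_sublist _).subset hx))
  set dA := small_rectangles.foldl (fun d r => (bsfA r).foldl (pvStepA r) d) d0 with hdA
  set dB := small_rectangles.foldl (fun d r => (bsfB r).foldl (pvStepA r) d) d0 with hdB
  have hkA : dA.keys = d0.keys := pvOuter_keys bsfA small_rectangles d0 hmemA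
  have hkB : dB.keys = d0.keys := pvOuter_keys bsfB small_rectangles d0 hmemB
  have hval : ∀ k, dA.getD k [] = dB.getD k [] := by
    intro k
    rw [hdA, hdB, pvOuter_getD, pvOuter_getD]
    congr 1
    exact pvFlatMap_congr small_rectangles _ _
      (fun r _ => (pvApp_count_eq boundaries r k).symm)
  have hitems : dA.items = dB.items := by
    rw [PySem.Dict.items_eq_map_keys dA (hkA ▸ hnd0) [],
      PySem.Dict.items_eq_map_keys dB (hkB ▸ hnd0) [], hkA, hkB]
    exact List.map_congr_left (fun k _ => by rw [hval k])
  rw [hitems]
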